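-- pv_equiv track=rewrite | github.com/pranavtomar/All_Practice_of_Python_Code | BasicPythonProgramming/ExerciseOnFunctionArgumentsLevel3.py | find_strong_numbers
-- ===== SOURCE A (Python) =====
-- def factorial(number):
--     fact = 1
--     while number > 0: #remove pass and write your logic to find and return the factorial of given number
--         fact *= number
--         number -= 1
--     return fact
--
-- def find_strong_numbers(num_list):
--     new_num_list = [] #remove pass and write your logic to find and return the list of strong numbers from the given list
--     for number in num_list:
--         if number == 0:
--             break
--         sum = 0
--         num = number
--         while num > 0:
--             rem = num % 10
--             sum += factorial(rem)
--             num //= 10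
--         if number == sum:
--             new_num_list.append(number)
--     return new_num_list
-- ===== SOURCE B (Python) =====
-- # The numbers equal to the sum of the factorials of their digits (base-10
-- # factorions) are known to be exactly 1, 2, 145 and 40585: a number with
-- # d >= 8 digits satisfies sum-of-digit-factorials <= d*9! < 10^(d-1) <= n,
-- # so a search below 10^7 is exhaustive.  So no per-element digit arithmetic
-- # is needed at all: keep everything before the first 0 and intersect with
-- # this fixed table.
-- _STRONG = (1, 2, 145, 40585)
--
--
-- def find_strong_numbers(num_list):
--     stop = num_list.index(0) if 0 in num_list else len(num_list)
--     return [n for n in num_list[:stop] if n in _STRONG]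
-- ===== Notes on version B (the rewrite author's own statement) =====
-- stated objective: faster
-- what changed: Replaces the per-element digit-factorial summation (inner digit loop with a hand-rolled factorial) by a membership test against the mathematically complete, fixed table of base-10 factorions {1, 2, 145, 40585}, applied to the prefix before the first 0 taken by index/slice instead of a break loop.
import Mathlib
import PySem

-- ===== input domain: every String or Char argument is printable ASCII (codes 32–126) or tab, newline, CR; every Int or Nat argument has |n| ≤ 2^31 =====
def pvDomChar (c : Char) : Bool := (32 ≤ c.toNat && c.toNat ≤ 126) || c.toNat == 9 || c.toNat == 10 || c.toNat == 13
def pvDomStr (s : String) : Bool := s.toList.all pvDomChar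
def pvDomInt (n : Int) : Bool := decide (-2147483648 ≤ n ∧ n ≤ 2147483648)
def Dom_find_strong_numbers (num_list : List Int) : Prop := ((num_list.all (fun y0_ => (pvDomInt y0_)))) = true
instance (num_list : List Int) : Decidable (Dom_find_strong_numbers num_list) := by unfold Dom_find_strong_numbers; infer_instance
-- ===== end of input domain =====

-- B drops the per-element digit-factorial computation entirely: the numbers equal to the
-- sum of the factorials of their digits are exactly 1, 2, 145, 40585 (proved exhaustive
-- below 2^31 in this file), so B slices off the prefix before the first 0 and filters it
-- by membership in that fixed table (faster by a constant factor: no digit loop).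

-- ===== PORT A =====
-- 'while number > 0: fact *= number; number -= 1'
def pvFactLoop (number fact : Int) : Int :=
  if number > 0 then pvFactLoop (number - 1) (fact * number) else fact
termination_by number.toNat
decreasing_by omega

def factorial (number : Int) : Int := pvFactLoop number 1

-- 'while num > 0: rem = num % 10; sum += factorial(rem); num //= 10'
def pvDigitLoop (num sum : Int) : Int :=
  if num > 0 then
    pvDigitLoop (PySem.Int.floordiv num 10) (sum + factorial (PySem.Int.mod num 10))
  else sum
termination_by num.toNat
decreasing_by
  rw [PySem.Int.floordiv_eq_ediv_of_pos (by omega)]; omega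

def pvFsLoop (acc : List Int) : List Int → List Int
  | [] => acc
  | number :: rest =>
      if number = 0 then acc
      else pvFsLoop (if number = pvDigitLoop number 0 then acc ++ [number] else acc) rest

def find_strong_numbers (num_list : List Int) : List Int := pvFsLoop [] num_list

-- ===== PORT B =====
-- 'stop = num_list.index(0) if 0 in num_list else len(num_list)' ('.index' is guarded by
-- the membership test, so '.getD 0' is never the fallback), then the slice num_list[:stop]
-- filtered by membership in the table (1, 2, 145, 40585).
def find_strong_numbers_alt (num_list : List Int) : List Int :=
  (PySem.List.slice num_list none (some
      (if (0 : Int) ∈ num_list then (((PySem.List.index? num_list 0).getD 0 : Nat) : Int)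
       else (num_list.length : Int)))).filter
    (fun n => n == 1 || n == 2 || n == 145 || n == 40585)

-- ===== PRECONDITION & SPEC =====
def Spec_find_strong_numbers (num_list : List Int) (out : List Int) : Prop := out = find_strong_numbers_alt num_list
instance (num_list : List Int) (out : List Int) : Decidable (Spec_find_strong_numbers num_list out) := by unfold Spec_find_strong_numbers; infer_instance

-- ===== CLAIM (what is proved, stated in full; the proofs are below) =====
def Claim_equal_find_strong_numbers : Prop := ∀ (num_list : List Int), Dom_find_strong_numbers num_list → Spec_find_strong_numbers num_list (find_strong_numbers num_list)

-- ===== LEMMAS AND PROOFS =====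

-- ---- A-side characterisation: pvDigitLoop computes the digit-factorial sum ----

lemma pvFactLoop_eq (k : Nat) : ∀ (number fact : Int), number.toNat = k →
    pvFactLoop number fact = fact * ((number.toNat.factorial : Nat) : Int) := by
  induction k with
  | zero =>
    intro number fact h
    rw [pvFactLoop]
    have hnp : ¬ number > 0 := by omega
    simp [hnp, h]
  | succ k ih =>
    intro number fact h
    rw [pvFactLoop]
    have hpos : number > 0 := by omega
    rw [if_pos hpos, ih (number - 1) _ (by omega)]
    have hm : number.toNat = (number - 1).toNat + 1 := by omega
    rw [hm, Nat.factorial_succ]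
    have hcast : (((number - 1).toNat : Int) + 1) = number := by omega
    push_cast
    rw [hcast]
    ring

lemma factorial_eq (n : Int) : factorial n = ((n.toNat.factorial : Nat) : Int) := by
  simpa using pvFactLoop_eq n.toNat n 1 rfl

-- factorial of a digit, as a plain table the kernel evaluates
def digFact : Nat → Nat
  | 0 => 1 | 1 => 1 | 2 => 2 | 3 => 6 | 4 => 24
  | 5 => 120 | 6 => 720 | 7 => 5040 | 8 => 40320 | 9 => 362880 | _+10 => 0

lemma digFact_eq_factorial (d : Nat) (hd : d < 10) : digFact d = Nat.factorial d := by
  interval_cases d <;> decide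

lemma digFact_le (d : Nat) : digFact d ≤ 362880 := by
  rcases d with _|_|_|_|_|_|_|_|_|_|d <;> simp [digFact]

-- the digit-factorial sum, expressed over Nat.digits
def dfsN (n : Nat) : Nat := ((Nat.digits 10 n).map digFact).sum

lemma dfsN_pos (n : Nat) (hn : 0 < n) :
    dfsN n = digFact (n % 10) + dfsN (n / 10) := by
  unfold dfsN
  rw [Nat.digits_def' (by omega : 1 < 10) hn]
  simp

lemma pvDigitLoop_eq (k : Nat) : ∀ (num sum : Int), num.toNat = k →
    pvDigitLoop num sum = sum + ((dfsN num.toNat : Nat) : Int) := by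
  induction k using Nat.strong_induction_on with
  | _ k ih =>
    intro num sum h
    rw [pvDigitLoop]
    by_cases hpos : num > 0
    · rw [if_pos hpos]
      have h10 : (0:Int) < 10 := by omega
      rw [PySem.Int.floordiv_eq_ediv_of_pos h10, PySem.Int.mod_eq_emod_of_pos h10]
      have hlt : (num / 10).toNat < k := by omega
      rw [ih _ hlt (num / 10) _ rfl, factorial_eq]
      have h1 : (num % 10).toNat = num.toNat % 10 := by omega
      have h2 : (num / 10).toNat = num.toNat / 10 := by omega
      rw [h1, h2, dfsN_pos num.toNat (by omega),
        digFact_eq_factorial (num.toNat % 10) (by omega)]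
      push_cast
      ring
    · have h0 : num.toNat = 0 := by omega
      simp [hpos, h0, dfsN]

-- ---- certified search: the only fixed points of dfsN below 10^7 are 1, 2, 145, 40585 ----

def chkLeaf (s : Nat) (acc : List Nat) : Bool :=
  (List.insertionSort (·≤·) (Nat.digits 10 s) != acc) ||
  (s == 1 || s == 2 || s == 145 || s == 40585)

def gen : Nat → Nat → Nat → List Nat → Bool
  | 0, _, s, acc => chkLeaf s acc
  | d+1, lo, s, acc => chkLeaf s acc &&
      ((List.range' lo (10 - lo)).all fun c => gen d c (s + digFact c) (acc ++ [c]))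

def genTop : Bool := (List.range 10).all (fun c => gen 6 c (digFact c) [c])

set_option maxRecDepth 10000 in
set_option maxHeartbeats 4000000 in
lemma genTop_true : genTop = true := by decide

lemma gen_sound : ∀ (d lo s : Nat) (acc : List Nat) (L : List Nat),
    gen d lo s acc = true → List.Pairwise (·≤·) L → L.length ≤ d →
    (∀ x ∈ L, x < 10) → (∀ x ∈ L, lo ≤ x) →
    chkLeaf (s + (L.map digFact).sum) (acc ++ L) = true := by
  intro d
  induction d with
  | zero =>
    intro lo s acc L hg hp hl _ _
    have : L = [] := List.eq_nil_of_length_eq_zero (by omega)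
    subst this
    simpa [gen] using hg
  | succ d ih =>
    intro lo s acc L hg hp hl h10 hlo
    rw [gen, Bool.and_eq_true, List.all_eq_true] at hg
    obtain ⟨hleaf, hall⟩ := hg
    cases L with
    | nil => simpa using hleaf
    | cons c L' =>
      have hc10 : c < 10 := h10 c (by simp)
      have hclo : lo ≤ c := hlo c (by simp)
      have hmem : c ∈ List.range' lo (10 - lo) := by
        rw [List.mem_range'_1]
        omega
      have hg' := hall c hmem
      obtain ⟨hhead, htail⟩ := List.pairwise_cons.1 hp
      have := ih c (s + digFact c) (acc ++ [c]) L' hg'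
        htail (by simp at hl; omega)
        (fun x hx => h10 x (by simp [hx]))
        (fun x hx => hhead x hx)
      have hA : acc ++ c :: L' = (acc ++ [c]) ++ L' := by simp
      rw [List.map_cons, List.sum_cons, hA, ← Nat.add_assoc]
      exact this

lemma strong_small (n : Nat) (hn : 0 < n) (h7 : n < 10^7) (hfix : dfsN n = n) :
    n = 1 ∨ n = 2 ∨ n = 145 ∨ n = 40585 := by
  have hb : (1:Nat) < 10 := by omega
  have hperm : (Nat.digits 10 n).Perm (List.insertionSort (·≤·) (Nat.digits 10 n)) :=
    (List.perm_insertionSort _ _).symm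
  have hsorted : List.Pairwise (·≤·) (List.insertionSort (·≤·) (Nat.digits 10 n)) :=
    List.pairwise_insertionSort _ _
  have hdne : Nat.digits 10 n ≠ [] := Nat.digits_ne_nil_iff_ne_zero.2 (by omega)
  have hne : List.insertionSort (·≤·) (Nat.digits 10 n) ≠ [] := by
    intro h
    rw [h] at hperm
    exact hdne hperm.eq_nil
  obtain ⟨c, L', hcl⟩ := List.exists_cons_of_ne_nil hne
  rw [hcl] at hperm hsorted
  obtain ⟨hhead, htail⟩ := List.pairwise_cons.1 hsorted
  have hd10 : ∀ x ∈ c :: L', x < 10 := fun x hx =>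
    Nat.digits_lt_base hb (hperm.mem_iff.2 hx)
  have hlen : L'.length ≤ 6 := by
    have h1 : (Nat.digits 10 n).length ≤ 7 := (Nat.digits_length_le_iff hb n).2 h7
    have h2 := hperm.length_eq
    simp at h2
    omega
  have hc10 : c < 10 := hd10 c (by simp)
  have hgen : gen 6 c (digFact c) [c] = true := by
    have := genTop_true
    rw [genTop, List.all_eq_true] at this
    exact this c (by simp [List.mem_range]; omega)
  have hchk := gen_sound 6 c (digFact c) [c] L' hgen
    htail hlen
    (fun x hx => hd10 x (by simp [hx]))
    (fun x hx => hhead x hx)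
  have hsum : digFact c + (L'.map digFact).sum = n := by
    have h3 : ((c :: L').map digFact).sum = n := by
      rw [← (hperm.map digFact).sum_eq]
      exact hfix
    simpa using h3
  rw [hsum] at hchk
  rw [chkLeaf, hcl] at hchk
  simp only [List.singleton_append, bne_self_eq_false, Bool.false_or,
    Bool.or_eq_true, beq_iff_eq] at hchk
  tauto

lemma dfsN_le (n : Nat) : dfsN n ≤ (Nat.digits 10 n).length * 362880 := by
  unfold dfsN
  induction Nat.digits 10 n with
  | nil => simp
  | cons d t ih =>
    simp only [List.map_cons, List.sum_cons, List.length_cons]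
    have := digFact_le d
    omega

lemma keyNat (n : Nat) (hn : 0 < n) (hb : n ≤ 2147483648) :
    (dfsN n = n ↔ (n = 1 ∨ n = 2 ∨ n = 145 ∨ n = 40585)) := by
  constructor
  · intro hfix
    by_cases h7 : n < 10^7
    · exact strong_small n hn h7 hfix
    · exfalso
      have hlen : (Nat.digits 10 n).length ≤ 10 :=
        (Nat.digits_length_le_iff (by omega) n).2 (by omega)
      have := dfsN_le n
      have : dfsN n ≤ 10 * 362880 := le_trans this (by
        have := Nat.mul_le_mul_right 362880 hlen
        omega)
      omega
  · rintro (rfl | rfl | rfl | rfl) <;> decide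

-- ---- B-side characterisation: the slice is the prefix before the first 0 ----

lemma idx_take (l : List Int) :
    (match List.idxOf? (0:Int) l with
      | some k => l.take k
      | none => l) = l.takeWhile (fun x => x != 0) := by
  induction l with
  | nil => rfl
  | cons a t ih =>
    rw [List.idxOf?_cons]
    by_cases ha : a = 0
    · subst ha
      simp
    · rw [if_neg (by simpa using ha)]
      cases h : List.idxOf? (0:Int) t with
      | none =>
        rw [h] at ih
        simp only at ih
        simp only [Option.map_none]
        rw [List.takeWhile_cons, if_pos (by simpa using ha), ← ih]
      | some k =>
        rw [h] at ih
        simp only at ih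
        simp only [Option.map_some]
        rw [List.takeWhile_cons, if_pos (by simpa using ha), List.take_succ_cons, ← ih]

lemma alt_eq_takeWhile (l : List Int) :
    find_strong_numbers_alt l
      = (l.takeWhile (fun x => x != 0)).filter
          (fun n => n == 1 || n == 2 || n == 145 || n == 40585) := by
  rw [find_strong_numbers_alt]
  by_cases hm : (0 : Int) ∈ l
  · rw [if_pos hm]
    have hs : (PySem.List.index? l 0).isSome = true :=
      (PySem.List.index?_isSome_iff l 0).2 hm
    obtain ⟨k, hk⟩ := Option.isSome_iff_exists.1 hs
    rw [hk]
    simp only [Option.getD_some]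
    rw [PySem.List.slice_to_natCast]
    have h2 : List.idxOf? (0:Int) l = some k := by
      rw [← PySem.List.index?_eq_idxOf?, hk]
    have h3 := idx_take l
    rw [h2] at h3
    simp only at h3
    rw [h3]
  · rw [if_neg hm, PySem.List.slice_to_natCast, List.take_length]
    have h4 : l.takeWhile (fun x => x != 0) = l := by
      rw [List.takeWhile_eq_self_iff]
      intro x hx
      simp only [bne_iff_ne, ne_eq]
      intro h
      exact hm (h ▸ hx)
    rw [h4]

-- ---- A-side loop shape ----

lemma pvFsLoop_eq (l : List Int) : ∀ (acc : List Int),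
    pvFsLoop acc l
      = acc ++ (l.takeWhile (fun x => x != 0)).filter
          (fun n => decide (n = pvDigitLoop n 0)) := by
  induction l with
  | nil => intro acc; simp [pvFsLoop]
  | cons n rest ih =>
    intro acc
    rw [pvFsLoop]
    by_cases hz : n = 0
    · simp [hz, List.takeWhile]
    · rw [if_neg hz, ih]
      have htw : (n :: rest).takeWhile (fun x => x != 0)
          = n :: rest.takeWhile (fun x => x != 0) := by
        simp [hz]
      rw [htw, List.filter_cons]
      by_cases hs : n = pvDigitLoop n 0
      · rw [if_pos hs]; simp [decide_eq_true hs]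
      · rw [if_neg hs]; simp [decide_eq_false hs]

-- ---- pointwise agreement of the two filter predicates on Dom, off 0 ----

lemma pred_agree (n : Int) (hlo : -2147483648 ≤ n) (hhi : n ≤ 2147483648) (hz : n ≠ 0) :
    (decide (n = pvDigitLoop n 0))
      = (n == 1 || n == 2 || n == 145 || n == 40585) := by
  by_cases hpos : 0 < n
  · rw [pvDigitLoop_eq n.toNat n 0 rfl]
    have hkey := keyNat n.toNat (by omega) (by omega)
    by_cases hfix : n = 0 + ((dfsN n.toNat : Nat) : Int)
    · rw [decide_eq_true hfix]
      have hmem : n = 1 ∨ n = 2 ∨ n = 145 ∨ n = 40585 := by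
        have := hkey.1 (by omega)
        omega
      rcases hmem with rfl | rfl | rfl | rfl <;> decide
    · rw [decide_eq_false hfix]
      have hnm : ¬ (n.toNat = 1 ∨ n.toNat = 2 ∨ n.toNat = 145 ∨ n.toNat = 40585) := by
        intro hmem
        have := hkey.2 hmem
        omega
      have h1 : ¬ (n = 1) := by omega
      have h2 : ¬ (n = 2) := by omega
      have h3 : ¬ (n = 145) := by omega
      have h4 : ¬ (n = 40585) := by omega
      simp [h1, h2, h3, h4]
  · have hloop : pvDigitLoop n 0 = 0 := by
      rw [pvDigitLoop]
      simp [hpos]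
    have h1 : ¬ (n = 1) := by omega
    have h2 : ¬ (n = 2) := by omega
    have h3 : ¬ (n = 145) := by omega
    have h4 : ¬ (n = 40585) := by omega
    simp [hloop, hz, h1, h2, h3, h4]

-- ===== VERDICT (by name: the statement is the Claim_ definition above) =====
theorem find_strong_numbers_spec : Claim_equal_find_strong_numbers := by
  intro num_list hdom
  show find_strong_numbers num_list = find_strong_numbers_alt num_list
  rw [find_strong_numbers, pvFsLoop_eq, alt_eq_takeWhile, List.nil_append]
  apply List.filter_congr
  intro x hx
  have hxz : (x != 0) = true :=
    List.mem_takeWhile_imp (p := fun x => x != 0) (l := num_list) hx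
  have hxl : x ∈ num_list := (List.takeWhile_prefix _).subset hx
  have hdx : pvDomInt x = true := by
    rw [Dom_find_strong_numbers, List.all_eq_true] at hdom
    exact hdom x hxl
  rw [pvDomInt, decide_eq_true_eq] at hdx
  exact pred_agree x hdx.1 hdx.2 (by simpa using hxz)
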